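-- pv_equiv track=rewrite | github.com/PatLyons7/Sendsational-Scripts | SpectrumOCR.py | process_normal_block
-- ===== SOURCE A (Python) =====
-- def process_normal_block(text):
--     lines = text.split('\n')
--     count = 1
--     for i in range(len(lines)):
--         if "_" in lines[i]:
--             lines[i] = f"DATETIME{count}"
--             count += 1
--     return '\n'.join(lines)
-- ===== SOURCE B (Python) =====
-- def process_normal_block(text):
--     # Single left-to-right character scan: emit each line as it ends, replacing
--     # underscore-containing lines by numbered DATETIME placeholders; no line list is built.
--     out = []
--     buf = []
--     seen = False
--     count = 1
--     for ch in text: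
--         if ch == '\n':
--             if seen:
--                 out.append(f"DATETIME{count}")
--                 count += 1
--             else:
--                 out.extend(buf)
--             out.append('\n')
--             buf = []
--             seen = False
--         else:
--             buf.append(ch)
--             if ch == '_':
--                 seen = True
--     if seen:
--         out.append(f"DATETIME{count}")
--     else:
--         out.extend(buf)
--     return ''.join(out)
-- ===== Notes on version B (the rewrite author's own statement) =====
-- stated objective: alternative
-- what changed: Replaced A's split-into-lines / index-loop with in-place assignment / join decomposition by a single left-to-right character scan that buffers the current line and emits either it or the next DATETIME placeholder as soon as the line ends.
import Mathlib
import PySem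

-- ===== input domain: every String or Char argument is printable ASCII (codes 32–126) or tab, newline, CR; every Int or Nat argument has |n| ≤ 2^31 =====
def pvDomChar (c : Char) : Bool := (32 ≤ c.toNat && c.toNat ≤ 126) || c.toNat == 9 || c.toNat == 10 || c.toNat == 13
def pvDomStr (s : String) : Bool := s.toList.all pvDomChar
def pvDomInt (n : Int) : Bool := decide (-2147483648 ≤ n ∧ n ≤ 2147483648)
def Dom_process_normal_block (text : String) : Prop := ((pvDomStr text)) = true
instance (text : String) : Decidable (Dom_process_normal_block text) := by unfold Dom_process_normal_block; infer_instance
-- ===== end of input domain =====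

-- B replaces A's split/index-loop/join decomposition by a single streaming character scan
-- emitting each line as it ends (objective: alternative; same return value).

-- ===== PORT A =====
-- f"DATETIME{count}" (shared literal helper)
def pvDT (count : Int) : List Char := "DATETIME".toList ++ PySem.Int.toChars count

-- one iteration of A's 'for i in range(len(lines))' loop, state = (lines, count)
def pvAStep (st : List (List Char) × Int) (i : Int) : List (List Char) × Int :=
  if PySem.Chars.isIn ['_'] (PySem.List.pyGetD st.1 i []) then
    (st.1.set i.toNat (pvDT st.2), st.2 + 1)
  else st

def process_normal_block (text : String) : String :=
  let lines := PySem.Chars.splitOn text.toList ['\n']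
  let res := (PySem.List.pyRange 0 (lines.length : Int) 1).foldl pvAStep (lines, 1)
  String.ofList (PySem.Chars.join ['\n'] res.1)

-- ===== PORT B =====
-- B's 'for ch in text' loop, state = (out, buf, seen, count)
def pvBLoop : List Char → List Char → List Char → Bool → Int → List Char
  | [], out, buf, seen, count => out ++ (if seen then pvDT count else buf)
  | c :: cs, out, buf, seen, count =>
      if c = '\n' then
        pvBLoop cs (out ++ (if seen then pvDT count else buf) ++ ['\n']) [] false
          (if seen then count + 1 else count)
      else
        pvBLoop cs out (buf ++ [c]) (seen || c == '_') count

def process_normal_block_alt (text : String) : String :=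
  String.ofList (pvBLoop text.toList [] [] false 1)

-- ===== PRECONDITION & SPEC =====
def Spec_process_normal_block (text : String) (out : String) : Prop := out = process_normal_block_alt text
instance (text : String) (out : String) : Decidable (Spec_process_normal_block text out) := by unfold Spec_process_normal_block; infer_instance

-- ===== CLAIM (what is proved, stated in full; the proofs are below) =====
def Claim_equal_process_normal_block : Prop := ∀ (text : String), Dom_process_normal_block text → Spec_process_normal_block text (process_normal_block text)

-- ===== LEMMAS AND PROOFS =====

-- proof-side model of split('\n'): buf is the pending (already read) part of the current line
def pvSplit1 : List Char → List Char → List (List Char)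
  | buf, [] => [buf]
  | buf, c :: cs => if c = '\n' then buf :: pvSplit1 [] cs else pvSplit1 (buf ++ [c]) cs

-- proof-side model of A's loop: the transformed lines, and the final count
def pvMapA : List (List Char) → Int → List (List Char)
  | [], _ => []
  | l :: t, c => if PySem.Chars.isIn ['_'] l then pvDT c :: pvMapA t (c + 1) else l :: pvMapA t c

def pvCntA : List (List Char) → Int → Int
  | [], c => c
  | l :: t, c => pvCntA t (if PySem.Chars.isIn ['_'] l then c + 1 else c)

theorem pvIsIn_single (c : Char) (l : List Char) : PySem.Chars.isIn [c] l = l.contains c := by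
  by_cases h : c ∈ l
  · have := (PySem.Chars.isIn_iff_infix [c] l).2 ((List.singleton_infix_iff c l).mpr h)
    simp [this, h]
  · have := (PySem.Chars.isIn_eq_false_iff [c] l).2 (by
      intro hc; exact h ((List.singleton_infix_iff c l).mp hc))
    simp [this, h]

theorem pvGo_split : ∀ (l : List Char) (fuel : Nat) (cur : List Char) (acc : List (List Char)),
    l.length ≤ fuel →
    PySem.Chars.splitOn.go ['\n'] fuel l cur acc = acc.reverse ++ pvSplit1 cur.reverse l := by
  intro l
  induction l with
  | nil =>
      intro fuel cur acc _
      cases fuel <;> simp [PySem.Chars.splitOn.go, pvSplit1]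
  | cons c rest ih =>
      intro fuel cur acc hf
      cases fuel with
      | zero => simp at hf
      | succ f =>
          by_cases hc : c = '\n'
          · subst hc
            simp only [PySem.Chars.splitOn.go, List.isPrefixOf, beq_self_eq_true,
              Bool.true_and, if_true]
            simp only [List.length_cons, List.length_nil, List.drop_succ_cons, List.drop_zero]
            rw [ih f [] (cur.reverse :: acc) (by simp only [List.length_cons] at hf; omega)]
            simp [pvSplit1]
          · have hpre : List.isPrefixOf ['\n'] (c :: rest) = false := by
              simp [List.isPrefixOf]; exact fun h => absurd h.symm hc
            simp only [PySem.Chars.splitOn.go, hpre, if_neg, Bool.false_eq_true, not_false_iff]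
            rw [ih f (c :: cur) acc (by simp only [List.length_cons] at hf; omega)]
            simp [pvSplit1, hc]

theorem pvSplitOn_eq (s : List Char) : PySem.Chars.splitOn s ['\n'] = pvSplit1 [] s := by
  unfold PySem.Chars.splitOn
  rw [pvGo_split s (s.length + 1) [] [] (by omega)]
  simp

theorem pvSplit1_ne_nil : ∀ (buf cs : List Char), pvSplit1 buf cs ≠ [] := by
  intro buf cs
  induction cs generalizing buf with
  | nil => simp [pvSplit1]
  | cons c t ih =>
      simp only [pvSplit1]
      split_ifs
      · simp
      · exact ih _

theorem pvMapA_ne_nil (t : List (List Char)) (c : Int) (h : t ≠ []) : pvMapA t c ≠ [] := by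
  cases t with
  | nil => exact absurd rfl h
  | cons l t => simp only [pvMapA]; split_ifs <;> simp

theorem pvJoin_cons_of_ne_nil (sep p : List Char) (rest : List (List Char)) (h : rest ≠ []) :
    PySem.Chars.join sep (p :: rest) = p ++ sep ++ PySem.Chars.join sep rest := by
  cases rest with
  | nil => exact absurd rfl h
  | cons q r => exact PySem.Chars.join_cons_cons sep p q r

theorem pvFoldA : ∀ (rest pre : List (List Char)) (count : Int),
    (PySem.List.pyRange (pre.length : Int) ((pre.length : Int) + (rest.length : Int)) 1).foldl
        pvAStep (pre ++ rest, count)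
      = (pre ++ pvMapA rest count, pvCntA rest count) := by
  intro rest
  induction rest with
  | nil =>
      intro pre count
      rw [show ((pre.length : Int) + (([] : List (List Char)).length : Int)) = (pre.length : Int) by simp]
      rw [PySem.List.pyRange_one_eq_nil (le_refl _)]
      simp [pvMapA, pvCntA]
  | cons l t ih =>
      intro pre count
      rw [PySem.List.pyRange_one_cons (by simp only [List.length_cons]; push_cast; omega)]
      have hget : PySem.List.pyGetD (pre ++ l :: t) ((pre.length : Nat) : Int) [] = l := by
        rw [PySem.List.pyGetD_natCast]; simp
      have hset : ∀ x : List Char, (pre ++ l :: t).set pre.length x = pre ++ x :: t := by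
        intro x
        rw [List.set_append_right _ _ (le_refl _)]
        simp
      simp only [List.foldl_cons, pvAStep, hget]
      by_cases h : PySem.Chars.isIn ['_'] l = true
      · simp only [h, if_true, Int.toNat_natCast, hset]
        have hb : (pre.length : Int) + ((l :: t).length : Int)
            = (((pre ++ [pvDT count]).length : Nat) : Int) + (t.length : Int) := by
          simp only [List.length_append, List.length_cons, List.length_nil]; push_cast; omega
        have hs : (pre.length : Int) + 1 = (((pre ++ [pvDT count]).length : Nat) : Int) := by
          simp only [List.length_append, List.length_cons, List.length_nil]; push_cast; omega
        rw [hb, hs, show pre ++ pvDT count :: t = (pre ++ [pvDT count]) ++ t by simp]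
        rw [ih (pre ++ [pvDT count]) (count + 1)]
        simp [pvMapA, pvCntA, h]
      · simp only [h, if_false, Bool.false_eq_true]
        have hb : (pre.length : Int) + ((l :: t).length : Int)
            = (((pre ++ [l]).length : Nat) : Int) + (t.length : Int) := by
          simp only [List.length_append, List.length_cons, List.length_nil]; push_cast; omega
        have hs : (pre.length : Int) + 1 = (((pre ++ [l]).length : Nat) : Int) := by
          simp only [List.length_append, List.length_cons, List.length_nil]; push_cast; omega
        rw [hb, hs, show pre ++ l :: t = (pre ++ [l]) ++ t by simp]
        rw [ih (pre ++ [l]) count]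
        simp [pvMapA, pvCntA, h]

theorem pvJoin_mapA_cons (buf : List Char) (L : List (List Char)) (count : Int) (hL : L ≠ []) :
    PySem.Chars.join ['\n'] (pvMapA (buf :: L) count)
      = (if buf.contains '_' then pvDT count else buf) ++ ['\n']
        ++ PySem.Chars.join ['\n'] (pvMapA L (if buf.contains '_' then count + 1 else count)) := by
  cases hb : buf.contains '_' <;>
    simp only [pvMapA, pvIsIn_single, hb, if_true, if_false, Bool.false_eq_true] <;>
    rw [pvJoin_cons_of_ne_nil _ _ _ (pvMapA_ne_nil _ _ hL)]

theorem pvBLoop_eq : ∀ (cs out buf : List Char) (count : Int),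
    pvBLoop cs out buf (buf.contains '_') count
      = out ++ PySem.Chars.join ['\n'] (pvMapA (pvSplit1 buf cs) count) := by
  intro cs
  induction cs with
  | nil =>
      intro out buf count
      simp only [pvBLoop, pvSplit1, pvMapA, pvIsIn_single]
      cases h : buf.contains '_'
      · simp only [Bool.false_eq_true, if_false, PySem.Chars.join_singleton]
      · simp only [if_true, PySem.Chars.join_singleton]
  | cons c t ih =>
      intro out buf count
      by_cases hc : c = '\n'
      · subst hc
        simp only [pvBLoop, if_true]
        rw [show (false : Bool) = ([] : List Char).contains '_' by rfl, ih]
        simp only [pvSplit1]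
        rw [if_pos trivial, pvJoin_mapA_cons _ _ _ (pvSplit1_ne_nil [] t)]
        simp [List.append_assoc]
      · simp only [pvBLoop, hc, if_false]
        have hctn : (buf.contains '_' || (c == '_')) = (buf ++ [c]).contains '_' := by
          rw [Bool.eq_iff_iff]; simp; tauto
        rw [hctn, ih]
        simp [pvSplit1, hc]

-- ===== VERDICT (by name: the statement is the Claim_ definition above) =====
theorem process_normal_block_spec : Claim_equal_process_normal_block := by
  intro text _
  unfold Spec_process_normal_block process_normal_block process_normal_block_alt
  simp only []
  rw [pvSplitOn_eq]
  have hA := pvFoldA (pvSplit1 [] text.toList) [] 1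
  simp only [List.length_nil, Nat.cast_zero, zero_add, List.nil_append] at hA
  rw [hA]
  rw [show (false : Bool) = ([] : List Char).contains '_' by rfl, pvBLoop_eq]
  simp
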